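-- pv_equiv track=rewrite | github.com/sorrow4468/BAEKJOON | 알고리즘/백준/2021/07/0731/3 6 9 게임의 왕이 되자.py | three_six_nine
-- ===== SOURCE A (Python) =====
-- def three_six_nine(n):
--     n = str(n) # 입력받은 숫자를 str로 변환
--     tsn_list = "369" # 369를 확인하는 str값 설정
--     result = "" # 초기 공백 결과값
--     for num in n: # str로 바꿔준 n을 순회
--         if num in tsn_list: # n의 각 숫자가 3,6,9일때
--             result += "X" # 결과값에 박수 한 번
--     if result == "": # 순회 다 해도 박수가 없으면
--         result += n # 원본 숫자 출력
--     return result # 결과값 반환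
-- ===== SOURCE B (Python) =====
-- def three_six_nine(n):
--     c, m = 0, abs(n)
--     while m:
--         if m % 10 in (3, 6, 9):
--             c += 1
--         m //= 10
--     return 'X' * c if c else str(n)
-- ===== Notes on version B (the rewrite author's own statement) =====
-- stated objective: alternative
-- what changed: B never scans str(n) to count: it extracts the decimal digits of abs(n) arithmetically (modulo and integer division by ten) in a while loop, then builds the result in closed form with string multiplication; str(n) is computed only when no clap digit exists.
import Mathlib
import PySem

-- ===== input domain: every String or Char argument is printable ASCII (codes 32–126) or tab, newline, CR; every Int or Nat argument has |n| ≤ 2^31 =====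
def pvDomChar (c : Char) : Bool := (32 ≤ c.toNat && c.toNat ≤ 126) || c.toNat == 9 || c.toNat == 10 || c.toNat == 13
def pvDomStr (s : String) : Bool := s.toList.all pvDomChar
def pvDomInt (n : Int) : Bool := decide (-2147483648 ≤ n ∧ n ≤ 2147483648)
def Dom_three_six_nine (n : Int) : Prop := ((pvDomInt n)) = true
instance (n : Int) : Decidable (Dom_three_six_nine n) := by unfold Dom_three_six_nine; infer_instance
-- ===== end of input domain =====

-- B counts clap digits arithmetically (% 10 / // 10 on abs(n)) instead of scanning str(n),
-- and builds the result in closed form with 'X' * c (objective: alternative).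

-- ===== PORT A =====
def three_six_nine (n : Int) : String :=
  let s := PySem.Int.toStr n
  let tsnList := "369"
  let result :=
    s.toList.foldl (fun result num =>
      if num ∈ tsnList.toList then result ++ "X" else result) ""
  let result := if result == "" then result ++ s else result
  result

-- ===== PORT B =====
-- the while loop of Source B: m = abs(n) ≥ 0, so the loop state is a Nat and
-- Python's % and // on it are Nat's % and / (exact on nonnegative operands)
def tsnLoop (m : Nat) : Nat :=
  if h : m = 0 then 0
  else (if m % 10 = 3 ∨ m % 10 = 6 ∨ m % 10 = 9 then 1 else 0) + tsnLoop (m / 10)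
decreasing_by exact Nat.div_lt_self (Nat.pos_of_ne_zero h) (by omega)

def three_six_nine_alt (n : Int) : String :=
  let c := tsnLoop n.natAbs
  if c ≠ 0 then String.ofList (List.replicate c 'X') else PySem.Int.toStr n

-- ===== PRECONDITION & SPEC =====
def Spec_three_six_nine (n : Int) (out : String) : Prop := out = three_six_nine_alt n
instance (n : Int) (out : String) : Decidable (Spec_three_six_nine n out) := by unfold Spec_three_six_nine; infer_instance

-- ===== CLAIM =====
def Claim_equal_three_six_nine : Prop := ∀ (n : Int), Dom_three_six_nine n → Spec_three_six_nine n (three_six_nine n)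

-- ===== LEMMAS AND PROOFS =====

def pvP (ch : Char) : Bool := ch == '3' || ch == '6' || ch == '9'

theorem pv_digitChar (d : Nat) (h : d < 10) :
    pvP (Nat.digitChar d) = decide (d = 3 ∨ d = 6 ∨ d = 9) := by
  interval_cases d <;> decide

theorem tsnLoop_ne {n : Nat} (hn : n ≠ 0) :
    tsnLoop n = (if n % 10 = 3 ∨ n % 10 = 6 ∨ n % 10 = 9 then 1 else 0) + tsnLoop (n / 10) := by
  rw [tsnLoop]; exact dif_neg hn

theorem core_count (fuel : Nat) (n : Nat) (ds : List Char) (h : n < fuel) :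
    (Nat.toDigitsCore 10 fuel n ds).countP pvP = tsnLoop n + ds.countP pvP := by
  induction fuel generalizing n ds with
  | zero => omega
  | succ f ih =>
    rw [Nat.toDigitsCore]
    by_cases h0 : n / 10 = 0
    · rw [if_pos h0]
      have hlt : n % 10 < 10 := Nat.mod_lt _ (by omega)
      rw [List.countP_cons, pv_digitChar _ hlt]
      by_cases hn : n = 0
      · subst hn; rw [tsnLoop]; simp
      · rw [tsnLoop_ne hn, h0]
        rw [show tsnLoop 0 = 0 from by simp [tsnLoop]]
        by_cases hp : n % 10 = 3 ∨ n % 10 = 6 ∨ n % 10 = 9 <;> simp [hp] <;> omega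
    · rw [if_neg h0]
      have hn : n ≠ 0 := by intro hx; exact h0 (by simp [hx])
      have hlt10 : n / 10 < f := by
        have := Nat.div_lt_self (Nat.pos_of_ne_zero hn) (by omega : 1 < 10)
        omega
      rw [ih (n / 10) _ hlt10, List.countP_cons]
      have hm : n % 10 < 10 := Nat.mod_lt _ (by omega)
      rw [pv_digitChar _ hm, tsnLoop_ne hn]
      by_cases hp : n % 10 = 3 ∨ n % 10 = 6 ∨ n % 10 = 9 <;> simp [hp] <;> omega

theorem toChars_count (n : Int) :
    (PySem.Int.toChars n).countP pvP = tsnLoop n.natAbs := by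
  unfold PySem.Int.toChars Nat.toDigits
  by_cases hneg : n < 0
  · rw [if_pos hneg, List.countP_cons]
    rw [core_count _ _ _ (Nat.lt_succ_self _)]
    simp [pvP]
  · rw [if_neg hneg]
    rw [core_count _ _ _ (Nat.lt_succ_self _)]
    have : n.toNat = n.natAbs := by omega
    simp [this]

theorem foldA (l : List Char) (r : String) :
    (l.foldl (fun (res : String) num =>
        if num ∈ "369".toList then res ++ "X" else res) r).toList
      = r.toList ++ List.replicate (l.countP pvP) 'X' := by
  induction l generalizing r with
  | nil => simp
  | cons hd t ih =>
    have hmem : (hd ∈ "369".toList) ↔ pvP hd = true := by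
      show hd ∈ ['3', '6', '9'] ↔ _
      simp [pvP, or_assoc]
    simp only [List.foldl_cons, List.countP_cons]
    by_cases hp : pvP hd = true
    · rw [if_pos (hmem.mpr hp), hp, ih]
      simp [String.toList_append, List.replicate_succ, List.append_assoc]
    · rw [if_neg (fun hx => hp (hmem.mp hx)), ih]
      simp only [hp, if_neg Bool.false_ne_true, Nat.add_zero]

-- ===== VERDICT =====
theorem three_six_nine_spec : Claim_equal_three_six_nine := by
  intro n _
  unfold Spec_three_six_nine three_six_nine three_six_nine_alt
  set s := PySem.Int.toStr n with hs
  have hsl : s.toList = PySem.Int.toChars n := PySem.Int.toList_toStr n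
  have hfold : (s.toList.foldl (fun (res : String) num =>
      if num ∈ "369".toList then res ++ "X" else res) "")
        = String.ofList (List.replicate (tsnLoop n.natAbs) 'X') := by
    rw [← String.toList_inj, foldA]
    simp [hsl, toChars_count]
  simp only [hfold]
  by_cases h0 : tsnLoop n.natAbs = 0
  · rw [h0]; simp
  · have hne : String.ofList (List.replicate (tsnLoop n.natAbs) 'X') ≠ "" := by
      intro hx
      have := congrArg String.toList hx
      simp only [String.toList_ofList] at this
      exact h0 (by simpa using congrArg List.length this)
    rw [if_neg (by simpa using hne), if_pos h0]
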